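-- pv_equiv track=rewrite | github.com/Due-Laser/DueGalvoPlotter | examples/calibrate_machine.py | get_frame_points
-- ===== SOURCE A (Python) =====
-- def get_frame_points(scaledPoints):
--     """
--     Retorna os cantos extremos do retângulo que delimita a arte.
--     Usa os pontos globais 'points' (assumindo que já foram centralizados).
--     """
--     xs = [p[0] for p in scaledPoints]
--     ys = [p[1] for p in scaledPoints]
--     min_x = min(xs)
--     max_x = max(xs)
--     min_y = min(ys)
--     max_y = max(ys)
--     # Ordem: inferior esquerdo, inferior direito, superior direito, superior esquerdo, e fecha com inferior esquerdo
--     return [(min_x, min_y), (max_x, min_y), (max_x, max_y), (min_x, max_y), (min_x, min_y)]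
-- ===== SOURCE B (Python) =====
-- def get_frame_points(scaledPoints):
--     if not scaledPoints:
--         raise ValueError("scaledPoints is empty")
--     min_x, min_y = scaledPoints[0]
--     max_x, max_y = min_x, min_y
--     for x, y in scaledPoints[1:]:
--         if x < min_x:
--             min_x = x
--         if x > max_x:
--             max_x = x
--         if y < min_y:
--             min_y = y
--         if y > max_y:
--             max_y = y
--     return [(min_x, min_y), (max_x, min_y), (max_x, max_y), (min_x, max_y), (min_x, min_y)]
-- ===== Notes on version B (the rewrite author's own statement) =====
-- stated objective: alternative
-- what changed: Replaced the four-pass approach (two projection lists, then min/max on each) with a single loop that seeds all four extremes from the first point and updates them while walking the rest.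
import Mathlib
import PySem

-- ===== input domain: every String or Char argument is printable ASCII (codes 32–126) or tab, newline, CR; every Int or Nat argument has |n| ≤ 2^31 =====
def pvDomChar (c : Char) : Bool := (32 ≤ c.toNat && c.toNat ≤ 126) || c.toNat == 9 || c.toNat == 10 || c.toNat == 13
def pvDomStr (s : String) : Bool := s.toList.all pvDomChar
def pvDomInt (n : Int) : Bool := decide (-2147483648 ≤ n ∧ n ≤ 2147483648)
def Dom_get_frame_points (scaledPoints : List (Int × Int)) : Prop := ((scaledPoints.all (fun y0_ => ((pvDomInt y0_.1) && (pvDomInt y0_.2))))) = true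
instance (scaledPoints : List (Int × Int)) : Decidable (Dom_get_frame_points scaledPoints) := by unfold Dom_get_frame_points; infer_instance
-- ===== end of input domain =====

-- ===== PORT A =====
-- Port of A: build xs/ys projection lists, take min/max of each (none = ValueError on empty).
def get_frame_points (scaledPoints : List (Int × Int)) : List (Int × Int) :=
  let xs := scaledPoints.map (fun p => p.1)
  let ys := scaledPoints.map (fun p => p.2)
  match PySem.List.min? xs (fun v => v), PySem.List.max? xs (fun v => v),
        PySem.List.min? ys (fun v => v), PySem.List.max? ys (fun v => v) with
  | some min_x, some max_x, some min_y, some max_y =>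
      [(min_x, min_y), (max_x, min_y), (max_x, max_y), (min_x, max_y), (min_x, min_y)]
  | _, _, _, _ => []  -- unreachable under Pre_ (empty list: Python raises ValueError)

-- ===== PORT B =====
-- Port of B: one fold over the tail, maintaining (min_x, max_x, min_y, max_y).
def get_frame_points_alt (scaledPoints : List (Int × Int)) : List (Int × Int) :=
  match scaledPoints with
  | [] => []  -- B raises ValueError here; excluded by Pre_
  | (x, y) :: rest =>
    let st := rest.foldl
      (fun (s : Int × Int × Int × Int) p =>
        (if p.1 < s.1 then p.1 else s.1,
         if p.1 > s.2.1 then p.1 else s.2.1,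
         if p.2 < s.2.2.1 then p.2 else s.2.2.1,
         if p.2 > s.2.2.2 then p.2 else s.2.2.2))
      (x, x, y, y)
    [(st.1, st.2.2.1), (st.2.1, st.2.2.1), (st.2.1, st.2.2.2), (st.1, st.2.2.2), (st.1, st.2.2.1)]

-- ===== PRECONDITION & SPEC =====
-- Pre_: A raises ValueError (min of empty list) on []; B raises ValueError there too.
def Pre_get_frame_points (scaledPoints : List (Int × Int)) : Prop := scaledPoints ≠ []
instance (scaledPoints : List (Int × Int)) : Decidable (Pre_get_frame_points scaledPoints) := by unfold Pre_get_frame_points; infer_instance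
def pvWitness_get_frame_points : (List (Int × Int)) := [(1, 2), (-3, 4)]

def Spec_get_frame_points (scaledPoints : List (Int × Int)) (out : List (Int × Int)) : Prop := out = get_frame_points_alt scaledPoints
instance (scaledPoints : List (Int × Int)) (out : List (Int × Int)) : Decidable (Spec_get_frame_points scaledPoints out) := by unfold Spec_get_frame_points; infer_instance

-- ===== CLAIM (what is proved, stated in full; the proofs are below) =====
def Claim_equal_get_frame_points : Prop := ∀ (scaledPoints : List (Int × Int)), Dom_get_frame_points scaledPoints → Pre_get_frame_points scaledPoints → Spec_get_frame_points scaledPoints (get_frame_points scaledPoints)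

-- ===== LEMMAS AND PROOFS =====

-- B's single fold over pairs computes the four separate fold-min/max of the projections.
theorem fold4_eq (rest : List (Int × Int)) (a b c d : Int) :
    rest.foldl
      (fun (s : Int × Int × Int × Int) p =>
        (if p.1 < s.1 then p.1 else s.1,
         if p.1 > s.2.1 then p.1 else s.2.1,
         if p.2 < s.2.2.1 then p.2 else s.2.2.1,
         if p.2 > s.2.2.2 then p.2 else s.2.2.2)) (a, b, c, d)
    = ((rest.map (fun p => p.1)).foldl min a,
       (rest.map (fun p => p.1)).foldl max b,
       (rest.map (fun p => p.2)).foldl min c,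
       (rest.map (fun p => p.2)).foldl max d) := by
  induction rest generalizing a b c d with
  | nil => simp
  | cons h t ih =>
      simp only [List.foldl_cons, List.map_cons]
      have e1 : (if h.1 < a then h.1 else a) = min a h.1 := by omega
      have e2 : (if h.1 > b then h.1 else b) = max b h.1 := by omega
      have e3 : (if h.2 < c then h.2 else c) = min c h.2 := by omega
      have e4 : (if h.2 > d then h.2 else d) = max d h.2 := by omega
      rw [e1, e2, e3, e4, ih]

-- ===== VERDICT (by name: the statement is the Claim_ definition above) =====
theorem get_frame_points_spec : Claim_equal_get_frame_points := by
  intro sp _ hpre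
  unfold Spec_get_frame_points get_frame_points get_frame_points_alt
  match sp with
  | [] => exact absurd rfl hpre
  | (x, y) :: rest =>
      simp only [List.map_cons, PySem.List.min?_id_cons, PySem.List.max?_id_cons, fold4_eq]
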